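-- pv_equiv track=rewrite | github.com/langflow-ai/langflow | src/backend/base/langflow/components/agents/builder/deployment_guidance.py | _assess_deployment_complexity
-- ===== SOURCE A (Python) =====
-- from typing import Any, Dict, List, Optional
--
-- def _assess_deployment_complexity(components: List[Dict[str, Any]]) -> str:
--     """Assess deployment complexity based on components"""
--
--     total_components = len(components)
--     integration_components = len([c for c in components if "tool" in c.get("type", "") or "mcp" in c.get("type", "")])
--     agent_components = len([c for c in components if "agent" in c.get("type", "")])
--
--     if total_components > 15 or integration_components > 5:
--         return "enterprise"
--     elif total_components > 10 or agent_components > 2: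
--         return "complex"
--     elif total_components > 6 or integration_components > 2:
--         return "moderate"
--     else:
--         return "simple"
-- ===== SOURCE B (Python) =====
-- from typing import Any, Dict, List, Optional
--
-- def _assess_deployment_complexity(components: List[Dict[str, Any]]) -> str:
--     """Assess deployment complexity: rank each count against its sorted thresholds,
--     take the maximum tier reached, and index a tier table."""
--     total = integration = agent = 0
--     for c in components:
--         t = c.get("type", "")
--         total += 1
--         integration += ("tool" in t) or ("mcp" in t)
--         agent += "agent" in t
--     level = max(
--         (total > 6) + (total > 10) + (total > 15),
--         (integration > 2) + 2 * (integration > 5),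
--         2 * (agent > 2),
--     )
--     return ("simple", "moderate", "complex", "enterprise")[level]
-- ===== Notes on version B (the rewrite author's own statement) =====
-- stated objective: alternative
-- what changed: Replaces A's three filtering list comprehensions plus if/elif threshold cascade with one counting pass and an arithmetical tier formulation: each count is ranked by how many of its thresholds it exceeds, the maximum tier indexes a level table instead of an early-return chain.
import Mathlib
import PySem

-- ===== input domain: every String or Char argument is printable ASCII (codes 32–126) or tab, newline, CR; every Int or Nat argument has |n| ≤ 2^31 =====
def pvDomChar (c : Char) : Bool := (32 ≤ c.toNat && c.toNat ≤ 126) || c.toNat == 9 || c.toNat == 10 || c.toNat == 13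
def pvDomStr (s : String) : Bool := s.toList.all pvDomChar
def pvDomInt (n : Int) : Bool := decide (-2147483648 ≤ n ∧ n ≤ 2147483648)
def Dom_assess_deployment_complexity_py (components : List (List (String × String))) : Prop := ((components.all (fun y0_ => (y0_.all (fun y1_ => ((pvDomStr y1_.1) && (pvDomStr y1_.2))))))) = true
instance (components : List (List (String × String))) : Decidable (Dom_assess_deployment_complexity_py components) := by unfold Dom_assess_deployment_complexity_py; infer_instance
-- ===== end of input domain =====

-- B replaces the three comprehensions + if/elif cascade with one counting pass and a
-- rank-thresholds-then-index-a-tier-table formulation; same return value, no speed claim.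

-- shared primitive: c.get("type", "") on an association list (first match)
def pvGetType (c : List (String × String)) : String :=
  match c.find? (fun p => p.1 == "type") with
  | some p => p.2
  | none => ""

-- ===== PORT A =====
def assess_deployment_complexity_py (components : List (List (String × String))) : String :=
  let total_components := components.length
  let integration_components :=
    (components.filter (fun c =>
      PySem.Str.isIn "tool" (pvGetType c) || PySem.Str.isIn "mcp" (pvGetType c))).length
  let agent_components :=
    (components.filter (fun c => PySem.Str.isIn "agent" (pvGetType c))).length
  if total_components > 15 || integration_components > 5 then "enterprise"
  else if total_components > 10 || agent_components > 2 then "complex"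
  else if total_components > 6 || integration_components > 2 then "moderate"
  else "simple"

-- ===== PORT B =====
def pvStep (acc : Nat × Nat × Nat) (c : List (String × String)) : Nat × Nat × Nat :=
  let t := pvGetType c
  (acc.1 + 1,
   acc.2.1 + (if PySem.Str.isIn "tool" t || PySem.Str.isIn "mcp" t then 1 else 0),
   acc.2.2 + (if PySem.Str.isIn "agent" t then 1 else 0))

def assess_deployment_complexity_py_alt (components : List (List (String × String))) : String :=
  let r := components.foldl pvStep (0, 0, 0)
  let level :=
    Nat.max
      (Nat.max
        ((if r.1 > 6 then 1 else 0) + (if r.1 > 10 then 1 else 0) + (if r.1 > 15 then 1 else 0))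
        ((if r.2.1 > 2 then 1 else 0) + 2 * (if r.2.1 > 5 then 1 else 0)))
      (2 * (if r.2.2 > 2 then 1 else 0))
  ["simple", "moderate", "complex", "enterprise"].getD level ""

-- ===== PRECONDITION & SPEC =====
def Spec_assess_deployment_complexity_py (components : List (List (String × String))) (out : String) : Prop := out = assess_deployment_complexity_py_alt components
instance (components : List (List (String × String))) (out : String) : Decidable (Spec_assess_deployment_complexity_py components out) := by unfold Spec_assess_deployment_complexity_py; infer_instance

-- ===== CLAIM (what is proved, stated in full; the proofs are below) =====
def Claim_equal_assess_deployment_complexity_py : Prop := ∀ (components : List (List (String × String))), Dom_assess_deployment_complexity_py components → Spec_assess_deployment_complexity_py components (assess_deployment_complexity_py components)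

-- ===== LEMMAS AND PROOFS =====

theorem pvStep_foldl (l : List (List (String × String))) (acc : Nat × Nat × Nat) :
    l.foldl pvStep acc =
      (acc.1 + l.length,
       acc.2.1 + (l.filter (fun c =>
         PySem.Str.isIn "tool" (pvGetType c) || PySem.Str.isIn "mcp" (pvGetType c))).length,
       acc.2.2 + (l.filter (fun c => PySem.Str.isIn "agent" (pvGetType c))).length) := by
  induction l generalizing acc with
  | nil => simp
  | cons c l ih =>
    simp only [List.foldl_cons, ih, List.length_cons, List.filter_cons, pvStep]
    split_ifs <;> simp_all <;> omega

-- the cascade and the max-of-tiers table agree on any three counts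
theorem pvCascade_eq_table (t i g : Nat) :
    (if t > 15 || i > 5 then "enterprise"
     else if t > 10 || g > 2 then "complex"
     else if t > 6 || i > 2 then "moderate"
     else "simple")
    = ["simple", "moderate", "complex", "enterprise"].getD
        (Nat.max
          (Nat.max
            ((if t > 6 then 1 else 0) + (if t > 10 then 1 else 0) + (if t > 15 then 1 else 0))
            ((if i > 2 then 1 else 0) + 2 * (if i > 5 then 1 else 0)))
          (2 * (if g > 2 then 1 else 0))) "" := by
  by_cases h1 : t > 15 <;> by_cases h2 : t > 10 <;> by_cases h3 : t > 6 <;>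
    by_cases h4 : i > 5 <;> by_cases h5 : i > 2 <;> by_cases h6 : g > 2 <;>
    simp [h1, h2, h3, h4, h5, h6] <;> omega

-- ===== VERDICT (by name: the statement is the Claim_ definition above) =====
theorem assess_deployment_complexity_py_spec : Claim_equal_assess_deployment_complexity_py := by
  intro components _
  unfold Spec_assess_deployment_complexity_py assess_deployment_complexity_py assess_deployment_complexity_py_alt
  simp only [pvStep_foldl, Nat.zero_add]
  exact pvCascade_eq_table _ _ _
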